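-- pv_equiv track=rewrite | github.com/ALSchwalm/foresight | predict_msvc.py | predict_state
-- ===== SOURCE A (Python) =====
-- def lcg(state, a, c, m, masked_bits):
--     '''
--     Determine the next value of a linear congruential generator
--
--     An LCG outputs values with the following recurrence relation:
--
--         state_(n+1) = a * state_n + c (mod m)
--         value_n = state_n >> masked_bits
--
--     @param state: The current state of the LCG
--     @return: The next state, with 'masked_bits' lower order bits removed
--     '''
--     return ((a * state + c) % m) >> masked_bits
--
-- def predict_state(values, a, c, m, masked_bits):
--     '''
--     Given a list of values from a LCG, predict the internal state
--
--     @param values: A list of consecutive values output from the LCG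
--     @return: A list of possible internal state values for the LCG
--     '''
--     candidates = []
--     for i in range(0, 2 ** masked_bits):
--         possible_state = (values[0] << masked_bits) + i
--         for n in range(1, len(values)):
--             if lcg(possible_state, a, c, m, masked_bits) == values[n]:
--                 possible_state = lcg(possible_state, a, c, m, masked_bits=0)
--             else:
--                 break
--         else:
--             candidates.append(possible_state)
--     return candidates
-- ===== SOURCE B (Python) =====
-- def predict_state(values, a, c, m, masked_bits):
--     '''
--     Given a list of values from a LCG, predict the internal state
--
--     Instead of running the full inner verification loop per candidate,
--     keep the list of still-live candidate states and filter/advance it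
--     level by level, one pass per observed output value.
--     '''
--     base = values[0] << masked_bits
--     states = [base + i for i in range(2 ** masked_bits)]
--     for v in values[1:]:
--         states = [(a * s + c) % m for s in states
--                   if ((a * s + c) % m) >> masked_bits == v]
--     return states
-- ===== Notes on version B (the rewrite author's own statement) =====
-- stated objective: alternative
-- what changed: Replaces A's per-candidate inner verification loop with early break by a level-synchronous search: one pass over the observed values, each pass filtering and advancing the whole list of still-live candidate states.
import Mathlib
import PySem

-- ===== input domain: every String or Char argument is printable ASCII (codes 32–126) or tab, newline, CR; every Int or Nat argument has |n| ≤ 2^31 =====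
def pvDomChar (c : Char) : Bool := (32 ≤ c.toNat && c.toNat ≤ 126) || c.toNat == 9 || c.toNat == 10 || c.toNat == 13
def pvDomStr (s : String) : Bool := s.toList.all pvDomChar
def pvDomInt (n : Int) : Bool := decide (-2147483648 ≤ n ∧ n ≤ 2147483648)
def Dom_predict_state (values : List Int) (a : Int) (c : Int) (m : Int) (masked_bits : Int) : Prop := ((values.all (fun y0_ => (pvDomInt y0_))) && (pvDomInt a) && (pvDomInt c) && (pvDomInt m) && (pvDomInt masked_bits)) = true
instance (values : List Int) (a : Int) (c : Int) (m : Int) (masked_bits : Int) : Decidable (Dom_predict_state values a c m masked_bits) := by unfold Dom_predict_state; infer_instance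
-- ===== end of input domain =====

-- B replaces A's per-candidate inner verification loop (with break) by a level-synchronous
-- filter-and-advance pass over the whole candidate list, one pass per observed value
-- (objective: alternative decomposition, same worst-case cost).

-- ===== PORT A =====
-- helper lcg of the Python module (exact: Python % is PySem.Int.mod, >> on a
-- nonnegative shift count is Lean's Int >>>)
def pv_lcg (state : Int) (a : Int) (c : Int) (m : Int) (masked_bits : Nat) : Int :=
  (PySem.Int.mod (a * state + c) m) >>> masked_bits

-- A's inner 'for n in range(1, len(values))' with break/else, iterating the
-- successive values[n]: some final state = the loop ran to completion ('else' branch)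
def pvALoop (a : Int) (c : Int) (m : Int) (mb : Nat) (vs : List Int) (s : Int) : Option Int :=
  match vs with
  | [] => some s
  | v :: rest =>
      if pv_lcg s a c m mb = v then pvALoop a c m mb rest (pv_lcg s a c m 0)
      else none

def predict_state (values : List Int) (a : Int) (c : Int) (m : Int) (masked_bits : Int) : List Int :=
  (PySem.List.pyRange 0 ((2 : Int) ^ masked_bits.toNat) 1).foldl
    (fun candidates i =>
      -- values[0] is in range under Pre_ (values ≠ []), so getD is never taken
      let possible_state := (((PySem.List.pyGet? values 0).getD 0) <<< masked_bits.toNat) + i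
      match pvALoop a c m masked_bits.toNat (values.drop 1) possible_state with
      | some s => candidates ++ [s]
      | none => candidates) []

-- ===== PORT B =====
def predict_state_alt (values : List Int) (a : Int) (c : Int) (m : Int) (masked_bits : Int) : List Int :=
  let mb := masked_bits.toNat
  let base := ((PySem.List.pyGet? values 0).getD 0) <<< mb
  let states0 := (PySem.List.pyRange 0 ((2 : Int) ^ mb) 1).map (fun i => base + i)
  (values.drop 1).foldl
    (fun states v =>
      states.filterMap (fun s =>
        if (PySem.Int.mod (a * s + c) m) >>> mb = v then some (PySem.Int.mod (a * s + c) m)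
        else none))
    states0

-- ===== PRECONDITION & SPEC =====
-- Pre_ excludes exactly the inputs where Python A raises: empty values (IndexError on
-- values[0]), negative masked_bits (TypeError/ValueError on 2**mb and <<), and m = 0
-- when the lcg is actually evaluated, i.e. when len(values) > 1 (ZeroDivisionError).
def Pre_predict_state (values : List Int) (a : Int) (c : Int) (m : Int) (masked_bits : Int) : Prop :=
  values ≠ [] ∧ 0 ≤ masked_bits ∧ (1 < values.length → m ≠ 0)
instance (values : List Int) (a : Int) (c : Int) (m : Int) (masked_bits : Int) : Decidable (Pre_predict_state values a c m masked_bits) := by unfold Pre_predict_state; infer_instance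

def pvWitness_predict_state : List Int × Int × Int × Int × Int := ([1, 3], 5, 3, 16, 1)

def Spec_predict_state (values : List Int) (a : Int) (c : Int) (m : Int) (masked_bits : Int) (out : List Int) : Prop := out = predict_state_alt values a c m masked_bits
instance (values : List Int) (a : Int) (c : Int) (m : Int) (masked_bits : Int) (out : List Int) : Decidable (Spec_predict_state values a c m masked_bits out) := by unfold Spec_predict_state; infer_instance

-- ===== CLAIM (what is proved, stated in full; the proofs are below) =====
def Claim_equal_predict_state : Prop := ∀ (values : List Int) (a : Int) (c : Int) (m : Int) (masked_bits : Int), Dom_predict_state values a c m masked_bits → Pre_predict_state values a c m masked_bits → Spec_predict_state values a c m masked_bits (predict_state values a c m masked_bits)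

-- ===== LEMMAS AND PROOFS =====

-- A's outer loop (append the survivors) is a filterMap of the inner verification.
theorem foldl_append_option (f : Int → Option Int) (L : List Int) (acc : List Int) :
    L.foldl (fun cands i => match f i with | some s => cands ++ [s] | none => cands) acc
      = acc ++ L.filterMap f := by
  induction L generalizing acc with
  | nil => simp
  | cons x xs ih =>
      simp only [List.foldl_cons, List.filterMap_cons]
      cases h : f x <;> simp [h, ih]

-- B's level-synchronous filter/advance passes compute, for each start state,
-- exactly A's inner verification loop.
theorem foldl_filterMap_eq (a c m : Int) (mb : Nat) (vs : List Int) (L : List Int) :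
    vs.foldl
      (fun states v =>
        states.filterMap (fun s =>
          if (PySem.Int.mod (a * s + c) m) >>> mb = v then some (PySem.Int.mod (a * s + c) m)
          else none))
      L
      = L.filterMap (pvALoop a c m mb vs) := by
  induction vs generalizing L with
  | nil => simp [pvALoop]
  | cons v rest ih =>
      simp only [List.foldl_cons, ih, List.filterMap_filterMap]
      refine List.filterMap_congr (fun s _ => ?_)
      by_cases h : (PySem.Int.mod (a * s + c) m) >>> mb = v <;>
        simp [pvALoop, pv_lcg, h, Option.bind]

theorem predict_state_spec : Claim_equal_predict_state := by
  intro values a c m masked_bits _hDom _hPre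
  unfold Spec_predict_state predict_state predict_state_alt
  rw [foldl_append_option, foldl_filterMap_eq, List.filterMap_map]
  rfl
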